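-- pv_equiv track=rewrite | github.com/octopuscabbage/smallab | smallab/specification_generator.py | generate
-- ===== SOURCE A (Python) =====
-- import collections
-- import itertools
-- import typing
-- import copy
--
-- def generate(generation_specification: typing.Dict) -> typing.List[collections.OrderedDict]:
--     '''
--     This class takes a generation specification and outputs a list of specifications based on it.
--     The format is as follows
--     {
--         "a": [1,2,3]
--         "b": [1,2]
--     }
--
--     Generates
--
--     [{
--         "a": 1,
--         "b": 1
--     },
--     {
--         "a": 2,
--         "b": 1
--     },
--     {
--         "a": 3,
--         "b": 1
--     },
--     {
--         "a": 1,
--         "b": 2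
--     },
--     {
--         "a": 2,
--         "b": 2
--     },
--     {
--         "a": 3,
--         "b": 2
--     }
--     ]
--
--     if you want key with a list value put it in double brackets ie
--     {
--         "a": [[1,2,3]]
--     }
--     '''
--     generation_specification = collections.OrderedDict(sorted(generation_specification.items()))
--     iterators = []
--     for key, value in generation_specification.items():
--         if isinstance(value, list):
--             iterators.append(list(map(lambda x: (key, x), value)))
--     specifications = []
--     for updates in itertools.product(*iterators):
--         cur_j = copy.deepcopy(generation_specification)
--         for update_key, update_value in updates:
--             cur_j[update_key] = update_value
--         specifications.append(cur_j)
--     return specifications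
-- ===== SOURCE B (Python) =====
-- import collections
--
--
-- def generate(generation_specification):
--     # Incremental cross-product: fold over the keys in sorted order, extending
--     # every partial spec with each value of the current key (first key varies
--     # slowest, matching itertools.product over the sorted keys).
--     specs = [[]]
--     for key, values in sorted(generation_specification.items()):
--         specs = [s + [(key, v)] for s in specs for v in values]
--     return [collections.OrderedDict(s) for s in specs]
-- ===== Notes on version B (the rewrite author's own statement) =====
-- stated objective: simpler
-- what changed: Replaces itertools.product over per-key iterators plus a whole-dict deepcopy and in-place overwrite per output with a single incremental cross-product fold over the sorted keys that builds each spec directly.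
import Mathlib
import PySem

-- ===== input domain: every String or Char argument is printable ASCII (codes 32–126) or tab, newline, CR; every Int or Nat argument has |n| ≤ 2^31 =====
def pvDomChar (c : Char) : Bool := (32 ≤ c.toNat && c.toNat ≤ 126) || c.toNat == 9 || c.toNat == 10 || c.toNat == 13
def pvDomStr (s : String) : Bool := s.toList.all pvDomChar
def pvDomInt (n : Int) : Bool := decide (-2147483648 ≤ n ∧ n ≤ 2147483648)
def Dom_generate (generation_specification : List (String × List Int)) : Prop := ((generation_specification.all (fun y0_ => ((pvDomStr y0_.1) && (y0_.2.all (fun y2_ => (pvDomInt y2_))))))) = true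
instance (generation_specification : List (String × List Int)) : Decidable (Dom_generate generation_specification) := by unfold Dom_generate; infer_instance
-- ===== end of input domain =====

-- B replaces itertools.product + per-output deepcopy of the whole dict by an incremental
-- cross-product fold over the sorted keys (objective: simpler; deepcopy of int values has
-- no observable effect, so agreement is about the returned value).

-- ===== PORT A =====
-- itertools.product(*iterators): first iterator varies slowest, last fastest
def pyProduct {α : Type} (ls : List (List α)) : List (List α) :=
  match ls with
  | [] => [[]]
  | l :: rest => l.flatMap (fun a => (pyProduct rest).map (fun t => a :: t))

-- cur_j maps keys to either the original list value (inl) or an update element (inr)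
def generate (generation_specification : List (String × List Int)) : List (List (String × Int)) :=
  -- OrderedDict(sorted(d.items())): items sorted by key (keys of a dict are unique, see Pre_)
  let sortedItems := PySem.List.sorted generation_specification (fun kv => kv.1) false
  -- every value has type list[int] here, so the isinstance(value, list) test is always true
  let iterators := sortedItems.foldl (fun acc kv => acc ++ [kv.2.map (fun x => (kv.1, x))]) []
  (pyProduct iterators).foldl (fun specs updates =>
      -- copy.deepcopy(generation_specification): values are ints/lists of ints, so the
      -- deep copy returns an equal dict
      let cur0 : PySem.Dict String (List Int ⊕ Int) :=
        PySem.Dict.mk (sortedItems.map (fun kv => (kv.1, Sum.inl kv.2)))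
      let cur := updates.foldl (fun d kv => d.insert kv.1 (Sum.inr kv.2)) cur0
      -- the returned dict: after the updates every key holds an int (inr)
      specs ++ [cur.items.filterMap (fun p =>
        match p.2 with | Sum.inl _ => none | Sum.inr x => some (p.1, x))]) []

-- ===== PORT B =====
def generate_alt (generation_specification : List (String × List Int)) : List (List (String × Int)) :=
  ((PySem.List.sorted generation_specification (fun kv => kv.1) false).foldl
      (fun specs kv => specs.flatMap (fun s => kv.2.map (fun v => s ++ [(kv.1, v)]))) [[]]).map
    -- OrderedDict(s) = insert the pairs of s in order into an empty dict, return its items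
    (fun s => ((s.foldl (fun d p => d.insert p.1 p.2) PySem.Dict.empty : PySem.Dict String Int)).items)

-- ===== PRECONDITION & SPEC =====
-- Pre_ excludes association lists with duplicate keys: they cannot arise from a Python
-- dict argument, so the ports' behaviour there is a representation artifact.
def Pre_generate (generation_specification : List (String × List Int)) : Prop :=
  (generation_specification.map Prod.fst).Nodup
instance (generation_specification : List (String × List Int)) : Decidable (Pre_generate generation_specification) := by unfold Pre_generate; infer_instance

def pvWitness_generate : (List (String × List Int)) := [("b", [1, 2]), ("a", [1, 2, 3])]

def Spec_generate (generation_specification : List (String × List Int)) (out : List (List (String × Int))) : Prop := out = generate_alt generation_specification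
instance (generation_specification : List (String × List Int)) (out : List (List (String × Int))) : Decidable (Spec_generate generation_specification out) := by unfold Spec_generate; infer_instance

-- ===== CLAIM (what is proved, stated in full; the proofs are below) =====
def Claim_equal_generate : Prop := ∀ (generation_specification : List (String × List Int)), Dom_generate generation_specification → Pre_generate generation_specification → Spec_generate generation_specification (generate generation_specification)

-- ===== LEMMAS AND PROOFS =====

-- the common cross product: first key varies slowest
def prodC (items : List (String × List Int)) : List (List (String × Int)) :=
  match items with
  | [] => [[]]
  | (k, vs) :: rest => vs.flatMap (fun v => (prodC rest).map (fun t => (k, v) :: t))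

theorem foldl_app_map {α β : Type} (l : List α) (g : α → β) (acc : List β) :
    l.foldl (fun a x => a ++ [g x]) acc = acc ++ l.map g := by
  induction l generalizing acc with
  | nil => simp
  | cons x xs ih => simp [ih]

theorem prodA_eq (items : List (String × List Int)) :
    pyProduct (items.map (fun kv => kv.2.map (fun x => (kv.1, x)))) = prodC items := by
  induction items with
  | nil => rfl
  | cons kv rest ih =>
      obtain ⟨k, vs⟩ := kv
      simp [pyProduct, prodC, ih, List.flatMap_map]

theorem mem_prodC_shape (items : List (String × List Int)) (u : List (String × Int))
    (h : u ∈ prodC items) : u.map Prod.fst = items.map Prod.fst := by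
  induction items generalizing u with
  | nil => simp [prodC] at h; simp [h]
  | cons kv rest ih =>
      obtain ⟨k, vs⟩ := kv
      simp [prodC] at h
      obtain ⟨v, -, t, ht, rfl⟩ := h
      simp [ih t ht]

theorem insert_items_cons {ν : Type} (h : String × ν) (t : List (String × ν)) (k : String) (w : ν)
    (hne : k ≠ h.1) :
    ((PySem.Dict.mk (h :: t)).insert k w).items = h :: ((PySem.Dict.mk t).insert k w).items := by
  have hbe : (h.1 == k) = false := by simp [Ne.symm hne]
  by_cases hc : (PySem.Dict.mk t).contains k = true
  · have hc' : (PySem.Dict.mk (h :: t)).contains k = true := by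
      rw [PySem.Dict.contains_mk] at hc ⊢
      simp [List.any_cons, hc]
    rw [PySem.Dict.items_insert_of_contains _ _ hc', PySem.Dict.items_insert_of_contains _ _ hc]
    simp only [List.map_cons, hbe, Bool.false_eq_true, if_false]
  · simp only [Bool.not_eq_true] at hc
    have hc' : (PySem.Dict.mk (h :: t)).contains k = false := by
      rw [PySem.Dict.contains_mk] at hc ⊢
      simp only [List.any_cons, Bool.or_eq_false_iff]
      exact ⟨hbe, hc⟩
    rw [PySem.Dict.items_insert_of_not_contains _ _ hc', PySem.Dict.items_insert_of_not_contains _ _ hc]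
    simp

theorem foldl_ins_cons (u : List (String × Int)) (h : String × (List Int ⊕ Int))
    (t : List (String × (List Int ⊕ Int))) (hk : ∀ kv ∈ u, kv.1 ≠ h.1) :
    (u.foldl (fun d kv => d.insert kv.1 (Sum.inr kv.2)) (PySem.Dict.mk (h :: t))).items
      = h :: (u.foldl (fun d kv => d.insert kv.1 (Sum.inr kv.2)) (PySem.Dict.mk t)).items := by
  induction u generalizing t with
  | nil => rfl
  | cons kv u' ih =>
      have h1 := insert_items_cons h t kv.1 (Sum.inr kv.2) (hk kv (by simp))
      simp only [List.foldl_cons]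
      have : (PySem.Dict.mk (h :: t)).insert kv.1 (Sum.inr kv.2)
          = PySem.Dict.mk (h :: ((PySem.Dict.mk t).insert kv.1 (Sum.inr kv.2)).items) := by
        apply PySem.Dict.ext; simpa using h1
      rw [this]
      have := ih (((PySem.Dict.mk t).insert kv.1 (Sum.inr kv.2)).items)
        (fun kv' hkv' => hk kv' (by simp [hkv']))
      simpa using this

theorem applyAux (items : List (String × List Int)) (u : List (String × Int))
    (hnd : (items.map Prod.fst).Nodup) (hsh : u.map Prod.fst = items.map Prod.fst) :
    ((u.foldl (fun d kv => d.insert kv.1 (Sum.inr kv.2))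
        (PySem.Dict.mk (items.map (fun kv => (kv.1, Sum.inl kv.2)))))).items.filterMap
      (fun p => match p.2 with | Sum.inl _ => none | Sum.inr x => some (p.1, x)) = u := by
  induction items generalizing u with
  | nil =>
      have hu : List.map Prod.fst u = ([] : List String) := by simpa using hsh
      have : u = [] := List.map_eq_nil_iff.mp hu
      subst this; rfl
  | cons kv rest ih =>
      obtain ⟨k, vs⟩ := kv
      match u with
      | [] => simp at hsh
      | (k', v) :: u' =>
        simp only [List.map_cons, List.cons.injEq] at hsh
        obtain ⟨rfl, hsh'⟩ := hsh
        simp only [List.map_cons, List.nodup_cons] at hnd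
        obtain ⟨hknot, hnd'⟩ := hnd
        simp only [List.foldl_cons]
        -- first insert overwrites the head in place
        have hhead : ((PySem.Dict.mk (((k', Sum.inl vs) : String × (List Int ⊕ Int)) :: rest.map (fun kv => (kv.1, Sum.inl kv.2)))).insert k' (Sum.inr v))
            = PySem.Dict.mk (((k', Sum.inr v) : String × (List Int ⊕ Int)) :: rest.map (fun kv => (kv.1, Sum.inl kv.2))) := by
          apply PySem.Dict.ext
          have hc : ((PySem.Dict.mk (((k', Sum.inl vs) : String × (List Int ⊕ Int)) :: rest.map (fun kv => (kv.1, Sum.inl kv.2))))).contains k' = true := by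
            rw [PySem.Dict.contains_mk]
            simp
          rw [PySem.Dict.items_insert_of_contains _ _ hc]
          simp only [List.map_cons, beq_self_eq_true, if_true, List.map_map]
          simp [Function.comp]
          intro a b hab he
          exact hknot (List.mem_map.mpr ⟨(a, b), hab, he⟩)
        simp only [List.map_cons]
        rw [hhead]
        have hk' : ∀ kv ∈ u', kv.1 ≠ ((k', Sum.inr v) : String × (List Int ⊕ Int)).1 := by
          intro kv hkv he
          exact hknot (hsh' ▸ (List.mem_map.mpr ⟨kv, hkv, he⟩))
        rw [foldl_ins_cons u' ((k', Sum.inr v) : String × (List Int ⊕ Int)) _ hk']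
        simp only [List.filterMap_cons]
        exact congrArg _ (ih u' hnd' hsh')

-- B's fold, characterised
theorem bfold (items : List (String × List Int)) (acc : List (List (String × Int))) :
    items.foldl (fun specs kv => specs.flatMap (fun s => kv.2.map (fun v => s ++ [(kv.1, v)]))) acc
      = acc.flatMap (fun s => (prodC items).map (fun t => s ++ t)) := by
  induction items generalizing acc with
  | nil => simp [prodC]
  | cons kv rest ih =>
      obtain ⟨k, vs⟩ := kv
      simp only [List.foldl_cons, ih, prodC]
      simp [List.flatMap_assoc, List.map_flatMap, List.flatMap_map, Function.comp_def]

-- OrderedDict(s) for s with distinct keys keeps s unchanged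
theorem dictOf_id (s : List (String × Int)) (hnd : (s.map Prod.fst).Nodup) :
    ((s.foldl (fun d p => d.insert p.1 p.2) PySem.Dict.empty : PySem.Dict String Int)).items = s := by
  have := PySem.Dict.items_foldl_insert_fresh (l := s) (k := Prod.fst) (v := Prod.snd)
    (d := (PySem.Dict.empty : PySem.Dict String Int))
    (by intro a _; simp [PySem.Dict.contains_empty]) hnd
  simpa using this

theorem sorted_keys_nodup (g : List (String × List Int)) (h : (g.map Prod.fst).Nodup) :
    ((PySem.List.sorted g (fun kv => kv.1) false).map Prod.fst).Nodup :=
  ((PySem.List.sorted_perm g (fun kv => kv.1) false).map Prod.fst).nodup_iff.mpr h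

-- ===== VERDICT (by name: the statement is the Claim_ definition above) =====
theorem generate_spec : Claim_equal_generate := by
  intro g _ hpre
  unfold Spec_generate generate generate_alt
  have hnd := sorted_keys_nodup g hpre
  set sg := PySem.List.sorted g (fun kv => kv.1) false with hsg
  -- A side
  rw [foldl_app_map, List.nil_append, foldl_app_map, List.nil_append, prodA_eq]
  -- B side
  rw [bfold]
  simp only [List.flatMap_cons, List.flatMap_nil, List.append_nil, List.nil_append, List.map_id']
  apply List.map_congr_left
  intro u hu
  have hsh := mem_prodC_shape sg u hu
  rw [applyAux sg u hnd hsh, dictOf_id u (by rw [hsh]; exact hnd)]
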